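-- pv_equiv track=rewrite | github.com/Wintermute0110/NARS | nars-console.py | scoreROM
-- ===== SOURCE A (Python) =====
-- def scoreROM(romTags, upTag_list, downTag_list):
--   score = 0
--
--   # Iterate through the tags, and add/subtract points depending on the list
--   # of given tags.
--   for tag in romTags:
--     # ~~~ Up tags increase score ~~~
--     if upTag_list is not None:
--       # Tags defined first have more score
--       tag_score = len(upTag_list)
--       for upTag in upTag_list:
--         if tag == upTag:
--           score += tag_score
--         tag_score -= 1
--
--     # ~~~ Down tags decrease the score ~~~
--     if downTag_list is not None:
--       tag_score = len(downTag_list)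
--       for downTag in downTag_list:
--         if tag == downTag:
--           score -= tag_score
--         tag_score -= 1
--
--   return score
-- ===== SOURCE B (Python) =====
-- def scoreROM(romTags, upTag_list, downTag_list):
--   # One pass to build a frequency table of the ROM tags, then one weighted
--   # pass over each tag list (weight = len(list) - index), instead of
--   # rescanning both tag lists for every ROM tag.
--   cnt = {}
--   for t in romTags:
--     cnt[t] = cnt.get(t, 0) + 1
--
--   score = 0
--   if upTag_list is not None:
--     n = len(upTag_list)
--     for i, t in enumerate(upTag_list):
--       score += (n - i) * cnt.get(t, 0)
--   if downTag_list is not None: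
--     m = len(downTag_list)
--     for i, t in enumerate(downTag_list):
--       score -= (m - i) * cnt.get(t, 0)
--   return score
-- ===== Notes on version B (the rewrite author's own statement) =====
-- stated objective: faster
-- what changed: Inverts the loop nesting: builds a frequency table of romTags in one pass, then scores each up/down tag once as (len-i) * count, instead of rescanning both tag lists for every ROM tag.
import Mathlib
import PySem

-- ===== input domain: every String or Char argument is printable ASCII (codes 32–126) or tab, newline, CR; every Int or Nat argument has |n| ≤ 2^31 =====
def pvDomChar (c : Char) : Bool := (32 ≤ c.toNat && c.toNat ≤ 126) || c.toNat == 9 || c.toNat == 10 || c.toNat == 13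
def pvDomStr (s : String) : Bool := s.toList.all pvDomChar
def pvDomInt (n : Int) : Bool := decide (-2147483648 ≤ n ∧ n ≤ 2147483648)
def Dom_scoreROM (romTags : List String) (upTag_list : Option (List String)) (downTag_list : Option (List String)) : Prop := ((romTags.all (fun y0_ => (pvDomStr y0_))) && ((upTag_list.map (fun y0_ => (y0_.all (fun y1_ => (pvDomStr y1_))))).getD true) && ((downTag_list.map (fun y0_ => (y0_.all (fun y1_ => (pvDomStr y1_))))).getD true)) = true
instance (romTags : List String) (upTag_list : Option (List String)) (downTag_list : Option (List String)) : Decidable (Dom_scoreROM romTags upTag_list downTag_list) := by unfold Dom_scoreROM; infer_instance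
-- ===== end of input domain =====

-- B replaces A's nested rescans (for each ROM tag, scan both tag lists) by one frequency
-- table of romTags plus one weighted pass over each tag list; measured faster.


-- ===== PORT A =====
def scoreROM (romTags : List String) (upTag_list : Option (List String)) (downTag_list : Option (List String)) : Int :=
  romTags.foldl (fun score tag =>
    let score :=
      match upTag_list with
      | none => score
      | some up =>
        (up.foldl (fun (p : Int × Int) upTag =>
            ((if tag == upTag then p.1 + p.2 else p.1), p.2 - 1))
          (score, (up.length : Int))).1
    match downTag_list with
    | none => score
    | some dn =>
      (dn.foldl (fun (p : Int × Int) downTag =>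
          ((if tag == downTag then p.1 - p.2 else p.1), p.2 - 1))
        (score, (dn.length : Int))).1) 0

-- ===== PORT B =====
def scoreROM_alt (romTags : List String) (upTag_list : Option (List String)) (downTag_list : Option (List String)) : Int :=
  let cnt : PySem.Dict String Int :=
    romTags.foldl (fun d t => d.insert t (d.getD t 0 + 1)) PySem.Dict.empty
  let score : Int := 0
  let score :=
    match upTag_list with
    | none => score
    | some up =>
      let n : Int := (up.length : Int)
      (PySem.List.enumerate up).foldl (fun s p => s + (n - p.1) * cnt.getD p.2 0) score
  match downTag_list with
  | none => score
  | some dn =>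
    let m : Int := (dn.length : Int)
    (PySem.List.enumerate dn).foldl (fun s p => s - (m - p.1) * cnt.getD p.2 0) score

-- ===== PRECONDITION & SPEC =====
def Spec_scoreROM (romTags : List String) (upTag_list : Option (List String)) (downTag_list : Option (List String)) (out : Int) : Prop := out = scoreROM_alt romTags upTag_list downTag_list
instance (romTags : List String) (upTag_list : Option (List String)) (downTag_list : Option (List String)) (out : Int) : Decidable (Spec_scoreROM romTags upTag_list downTag_list out) := by unfold Spec_scoreROM; infer_instance

-- ===== CLAIM (what is proved, stated in full; the proofs are below) =====
def Claim_equal_scoreROM : Prop := ∀ (romTags : List String) (upTag_list : Option (List String)) (downTag_list : Option (List String)), Dom_scoreROM romTags upTag_list downTag_list → Spec_scoreROM romTags upTag_list downTag_list (scoreROM romTags upTag_list downTag_list)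

-- ===== LEMMAS AND PROOFS =====

-- ===== VERDICT (by name: the statement is the Claim_ definition above) =====
-- weighted match sum: A's inner loop over a tag list, starting at weight k
def wsum (tag : String) (k : Int) : List String → Int
  | [] => 0
  | t :: ts => (if tag == t then k else 0) + wsum tag (k - 1) ts

-- B's weighted count sum over a tag list with counts c, starting at weight k
def bsum (c : String → Int) (k : Int) : List String → Int
  | [] => 0
  | t :: ts => k * c t + bsum c (k - 1) ts

theorem afold_up (tag : String) : ∀ (l : List String) (s k : Int),
    (l.foldl (fun (p : Int × Int) u => ((if tag == u then p.1 + p.2 else p.1), p.2 - 1)) (s, k)).1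
      = s + wsum tag k l := by
  intro l
  induction l with
  | nil => intro s k; simp [wsum]
  | cons t ts ih =>
      intro s k
      simp only [List.foldl_cons, wsum, ih]
      split <;> ring

theorem afold_dn (tag : String) : ∀ (l : List String) (s k : Int),
    (l.foldl (fun (p : Int × Int) u => ((if tag == u then p.1 - p.2 else p.1), p.2 - 1)) (s, k)).1
      = s - wsum tag k l := by
  intro l
  induction l with
  | nil => intro s k; simp [wsum]
  | cons t ts ih =>
      intro s k
      simp only [List.foldl_cons, wsum, ih]
      split <;> ring

theorem bfold_add (c : String → Int) (n : Int) : ∀ (l : List String) (j acc : Int),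
    ((PySem.List.enumerate l (start := j)).foldl
        (fun (s : Int) (p : Int × String) => s + (n - p.1) * c p.2) acc)
      = acc + bsum c (n - j) l := by
  intro l
  induction l with
  | nil => intro j acc; simp [PySem.List.enumerate_nil, bsum]
  | cons t ts ih =>
      intro j acc
      rw [PySem.List.enumerate_cons, List.foldl_cons, ih]
      simp only [bsum]
      ring

theorem bfold_sub (c : String → Int) (n : Int) : ∀ (l : List String) (j acc : Int),
    ((PySem.List.enumerate l (start := j)).foldl
        (fun (s : Int) (p : Int × String) => s - (n - p.1) * c p.2) acc)
      = acc - bsum c (n - j) l := by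
  intro l
  induction l with
  | nil => intro j acc; simp [PySem.List.enumerate_nil, bsum]
  | cons t ts ih =>
      intro j acc
      rw [PySem.List.enumerate_cons, List.foldl_cons, ih]
      simp only [bsum]
      ring

theorem bsum_zero (k : Int) (l : List String) : bsum (fun _ => 0) k l = 0 := by
  induction l generalizing k with
  | nil => simp [bsum]
  | cons t ts ih => simp [bsum, ih]

theorem bsum_add (c1 c2 : String → Int) (k : Int) (l : List String) :
    bsum (fun t => c1 t + c2 t) k l = bsum c1 k l + bsum c2 k l := by
  induction l generalizing k with
  | nil => simp [bsum]
  | cons t ts ih => simp [bsum, ih]; ring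

theorem bsum_indicator (r : String) (k : Int) (l : List String) :
    bsum (fun t => if t == r then (1 : Int) else 0) k l = wsum r k l := by
  induction l generalizing k with
  | nil => simp [bsum, wsum]
  | cons t ts ih =>
      simp only [bsum, wsum, ih]
      by_cases h : t = r
      · subst h; simp
      · have h1 : (t == r) = false := by simp [h]
        have h2 : (r == t) = false := by simp [Ne.symm h]
        simp [h1, h2]

-- the loop swap: B's weighted-count sum equals the sum of A's per-ROM-tag sums
theorem bsum_count (romTags : List String) (k : Int) (l : List String) :
    bsum (fun t => (romTags.count t : Int)) k l
      = (romTags.map (fun r => wsum r k l)).sum := by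
  induction romTags with
  | nil => simp [bsum_zero k l]
  | cons r rs ih =>
      have step : (fun t => (((r :: rs).count t : Int)))
          = fun t => (if t == r then (1 : Int) else 0) + (rs.count t : Int) := by
        funext t
        rw [List.count_cons]
        by_cases h : t = r
        · subst h; simp; omega
        · have h1 : (t == r) = false := by simp [h]
          have h2 : (r == t) = false := by simp [Ne.symm h]
          simp [h1, h2]
      rw [step, bsum_add, bsum_indicator, ih]
      simp

theorem sum_map_sub (f h : String → Int) (l : List String) :
    (l.map (fun x => f x - h x)).sum = (l.map f).sum - (l.map h).sum := by
  induction l with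
  | nil => simp
  | cons x xs ih => simp [ih]; ring

theorem cnt_eq (romTags : List String) :
    ∀ t : String,
      (romTags.foldl (fun d t => d.insert t (d.getD t 0 + 1)) PySem.Dict.empty).getD t 0
        = (romTags.count t : Int) := by
  intro t
  rw [PySem.Dict.foldl_insert_getD_add_one_eq_counter, PySem.Dict.getD_counter]

theorem foldl_id (l : List String) (a : Int) : l.foldl (fun s _ => s) a = a := by
  induction l generalizing a with
  | nil => rfl
  | cons x xs ih => simp only [List.foldl_cons]; exact ih a

theorem scoreROM_spec : Claim_equal_scoreROM := by
  intro romTags upTag_list downTag_list _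
  unfold Spec_scoreROM
  have hcnt := cnt_eq romTags
  cases upTag_list with
  | none =>
      cases downTag_list with
      | none =>
          simp only [scoreROM, scoreROM_alt]
          exact foldl_id romTags 0
      | some dn =>
          simp only [scoreROM, scoreROM_alt]
          have hstep : (fun (score : Int) (tag : String) =>
              (dn.foldl (fun (p : Int × Int) downTag =>
                  ((if tag == downTag then p.1 - p.2 else p.1), p.2 - 1))
                (score, (dn.length : Int))).1)
              = fun (score : Int) (tag : String) => score + (- wsum tag (dn.length : Int) dn) := by
            funext score tag
            rw [afold_dn]
            ring
          rw [hstep, PySem.List.foldl_add]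
          have hfun : (fun (s : Int) (p : Int × String) =>
              s - ((dn.length : Int) - p.1) *
                ((romTags.foldl (fun d t => d.insert t (d.getD t 0 + 1)) PySem.Dict.empty).getD p.2 0))
              = fun (s : Int) (p : Int × String) =>
                  s - ((dn.length : Int) - p.1) * ((romTags.count p.2 : Int)) := by
            funext s p; rw [hcnt]
          rw [hfun, bfold_sub (fun t => (romTags.count t : Int)) (dn.length : Int) dn 0 0]
          simp only [sub_zero, zero_sub]
          rw [bsum_count romTags (dn.length : Int) dn]
          have := sum_map_sub (fun _ => (0 : Int)) (fun r => wsum r (dn.length : Int) dn) romTags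
          simp only [zero_sub] at this
          simp [this]
  | some up =>
      cases downTag_list with
      | none =>
          simp only [scoreROM, scoreROM_alt]
          have hstep : (fun (score : Int) (tag : String) =>
              (up.foldl (fun (p : Int × Int) upTag =>
                  ((if tag == upTag then p.1 + p.2 else p.1), p.2 - 1))
                (score, (up.length : Int))).1)
              = fun (score : Int) (tag : String) => score + wsum tag (up.length : Int) up := by
            funext score tag
            rw [afold_up]
          rw [hstep, PySem.List.foldl_add]
          have hfun : (fun (s : Int) (p : Int × String) =>
              s + ((up.length : Int) - p.1) *
                ((romTags.foldl (fun d t => d.insert t (d.getD t 0 + 1)) PySem.Dict.empty).getD p.2 0))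
              = fun (s : Int) (p : Int × String) =>
                  s + ((up.length : Int) - p.1) * ((romTags.count p.2 : Int)) := by
            funext s p; rw [hcnt]
          rw [hfun, bfold_add (fun t => (romTags.count t : Int)) (up.length : Int) up 0 0]
          simp only [sub_zero, zero_add]
          rw [bsum_count romTags (up.length : Int) up]
      | some dn =>
          simp only [scoreROM, scoreROM_alt]
          have hstep : (fun (score : Int) (tag : String) =>
              (dn.foldl (fun (p : Int × Int) downTag =>
                  ((if tag == downTag then p.1 - p.2 else p.1), p.2 - 1))
                ((up.foldl (fun (p : Int × Int) upTag =>
                    ((if tag == upTag then p.1 + p.2 else p.1), p.2 - 1))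
                  (score, (up.length : Int))).1, (dn.length : Int))).1)
              = fun (score : Int) (tag : String) =>
                  score + (wsum tag (up.length : Int) up - wsum tag (dn.length : Int) dn) := by
            funext score tag
            rw [afold_dn, afold_up]
            ring
          rw [hstep, PySem.List.foldl_add]
          have hfunu : (fun (s : Int) (p : Int × String) =>
              s + ((up.length : Int) - p.1) *
                ((romTags.foldl (fun d t => d.insert t (d.getD t 0 + 1)) PySem.Dict.empty).getD p.2 0))
              = fun (s : Int) (p : Int × String) =>
                  s + ((up.length : Int) - p.1) * ((romTags.count p.2 : Int)) := by
            funext s p; rw [hcnt]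
          have hfund : (fun (s : Int) (p : Int × String) =>
              s - ((dn.length : Int) - p.1) *
                ((romTags.foldl (fun d t => d.insert t (d.getD t 0 + 1)) PySem.Dict.empty).getD p.2 0))
              = fun (s : Int) (p : Int × String) =>
                  s - ((dn.length : Int) - p.1) * ((romTags.count p.2 : Int)) := by
            funext s p; rw [hcnt]
          rw [hfunu, hfund,
            bfold_add (fun t => (romTags.count t : Int)) (up.length : Int) up 0 0]
          simp only [sub_zero, zero_add]
          rw [bfold_sub (fun t => (romTags.count t : Int)) (dn.length : Int) dn 0
              (bsum (fun t => (romTags.count t : Int)) (up.length : Int) up)]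
          simp only [sub_zero]
          rw [bsum_count romTags (up.length : Int) up, bsum_count romTags (dn.length : Int) dn,
            ← sum_map_sub]
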